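-- pv_equiv track=rewrite | github.com/pypi-data/pypi-mirror-360 | packages/KUtilz/kutilz-0.1.5.tar.gz/kutilz-0.1.5/KUtils/Utils/DentalUtils/FDI.py | opposite_quadrant
-- ===== SOURCE A (Python) =====
-- def opposite_quadrant(fdi: int) -> int:
--     candidates = [
--         set([1, 4]),
--         set([2, 3]),
--         set([5, 8]),
--         set([6, 7])
--     ]
--
--     if fdi < 10:
--         quadrant = fdi
--     else:
--         quadrant = fdi // 10
--
--     for c in candidates:
--         if quadrant in c:
--             pair = c
--             break
--     else:
--         raise ValueError(f'Bad FDI value {fdi} with quadrant {quadrant}')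
--
--     for el in pair:
--         if quadrant != el:
--             return el
--
--     raise RuntimeError(f'This shouldnt happen!')
-- ===== SOURCE B (Python) =====
-- def opposite_quadrant(fdi: int) -> int:
--     quadrant = fdi if fdi < 10 else fdi // 10
--     if 1 <= quadrant <= 4:
--         return 5 - quadrant
--     if 5 <= quadrant <= 8:
--         return 13 - quadrant
--     raise ValueError(f'Bad FDI value {fdi} with quadrant {quadrant}')
-- ===== Notes on version B (the rewrite author's own statement) =====
-- stated objective: simpler
-- what changed: Replaces the four-set table, the scanning loop that finds the containing pair and the second loop that picks the other element with a closed-form pair sum (five minus the quadrant for upper quadrants, thirteen minus the quadrant for lower ones).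
import Mathlib
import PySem

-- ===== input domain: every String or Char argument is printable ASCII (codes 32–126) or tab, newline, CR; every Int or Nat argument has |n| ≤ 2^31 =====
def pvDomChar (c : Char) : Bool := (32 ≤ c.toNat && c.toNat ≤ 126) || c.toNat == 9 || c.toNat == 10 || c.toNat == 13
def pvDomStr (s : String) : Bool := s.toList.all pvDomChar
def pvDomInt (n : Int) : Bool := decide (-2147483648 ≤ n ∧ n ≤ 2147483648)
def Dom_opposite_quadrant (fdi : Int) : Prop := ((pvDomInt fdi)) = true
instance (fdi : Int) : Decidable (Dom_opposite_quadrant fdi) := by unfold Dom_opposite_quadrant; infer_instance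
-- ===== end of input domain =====

-- B replaces A's four-set table and two scanning loops with the closed-form pair sum (5-q / 13-q): simpler.


-- ===== PORT A =====
-- A: a table of four pairs (Python sets of small ints; iteration order is ascending for these literals),
-- a loop finding the pair containing the quadrant, then a loop returning the other element.
-- Where Python raises (ValueError / RuntimeError) the port returns 0; Pre_ excludes exactly those inputs.
def opposite_quadrant (fdi : Int) : Int :=
  let candidates : List (PySem.Set Int) :=
    [PySem.Set.ofList [1, 4], PySem.Set.ofList [2, 3], PySem.Set.ofList [5, 8], PySem.Set.ofList [6, 7]]
  let quadrant : Int := if fdi < 10 then fdi else PySem.Int.floordiv fdi 10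
  match candidates.find? (fun c => decide (quadrant ∈ c)) with
  | none => 0  -- raise ValueError (outside Pre_)
  | some pair =>
    match pair.find? (fun el => decide (quadrant ≠ el)) with
    | none => 0  -- raise RuntimeError (unreachable)
    | some el => el

-- ===== PORT B =====
-- B: same quadrant extraction, then the closed-form pair sum; raise (outside Pre_) → 0.
def opposite_quadrant_alt (fdi : Int) : Int :=
  let quadrant : Int := if fdi < 10 then fdi else PySem.Int.floordiv fdi 10
  if 1 ≤ quadrant ∧ quadrant ≤ 4 then 5 - quadrant
  else if 5 ≤ quadrant ∧ quadrant ≤ 8 then 13 - quadrant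
  else 0  -- raise ValueError (outside Pre_)

-- ===== PRECONDITION & SPEC =====
-- Pre_ admits exactly the inputs whose quadrant digit lies in 1..8; outside it A raises ValueError (and so does B).
def Pre_opposite_quadrant (fdi : Int) : Prop :=
  1 ≤ (if fdi < 10 then fdi else PySem.Int.floordiv fdi 10) ∧
  (if fdi < 10 then fdi else PySem.Int.floordiv fdi 10) ≤ 8

instance (fdi : Int) : Decidable (Pre_opposite_quadrant fdi) := by
  unfold Pre_opposite_quadrant; infer_instance

def pvWitness_opposite_quadrant : Int := (37)

def Spec_opposite_quadrant (fdi : Int) (out : Int) : Prop := out = opposite_quadrant_alt fdi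
instance (fdi : Int) (out : Int) : Decidable (Spec_opposite_quadrant fdi out) := by
  unfold Spec_opposite_quadrant; infer_instance

-- ===== CLAIM (what is proved, stated in full; the proofs are below) =====
def Claim_equal_opposite_quadrant : Prop :=
  ∀ (fdi : Int), Dom_opposite_quadrant fdi → Pre_opposite_quadrant fdi →
    Spec_opposite_quadrant fdi (opposite_quadrant fdi)

-- ===== LEMMAS AND PROOFS =====

-- Both ports depend on fdi only through the quadrant: their bodies agree for every quadrant in 1..8.
theorem pv_core (q : Int) (h1 : 1 ≤ q) (h8 : q ≤ 8) :
    (match ([PySem.Set.ofList [1, 4], PySem.Set.ofList [2, 3],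
             PySem.Set.ofList [5, 8], PySem.Set.ofList [6, 7]] :
             List (PySem.Set Int)).find? (fun c => decide (q ∈ c)) with
     | none => (0 : Int)
     | some pair =>
       match pair.find? (fun el => decide (q ≠ el)) with
       | none => 0
       | some el => el) =
    (if 1 ≤ q ∧ q ≤ 4 then 5 - q else if 5 ≤ q ∧ q ≤ 8 then 13 - q else 0) := by
  interval_cases q <;> decide

-- ===== VERDICT (by name: the statement is the Claim_ definition above) =====
theorem opposite_quadrant_spec : Claim_equal_opposite_quadrant := by
  intro fdi _ hpre
  unfold Spec_opposite_quadrant opposite_quadrant opposite_quadrant_alt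
  exact pv_core _ hpre.1 hpre.2
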